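-- pv_equiv track=rewrite | github.com/SriLikesToSing/fastLane | src/main.py | removeExcludedChars
-- ===== SOURCE A (Python) =====
-- def removeExcludedChars(string, exclude):
--     strList = list(string)
--     excludedString = ""
--
--     for char in string:
--         if char in exclude:
--             continue
--         else:
--             excludedString+=char
--     return excludedString
-- ===== SOURCE B (Python) =====
-- def removeExcludedChars(string, exclude):
--     banned = set(exclude)
--     pieces = []
--     start = 0
--     for i, ch in enumerate(string):
--         if ch in banned:
--             pieces.append(string[start:i])
--             start = i + 1
--     pieces.append(string[start:])
--     return "".join(pieces)
-- ===== Notes on version B (the rewrite author's own statement) =====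
-- stated objective: alternative
-- what changed: B collects the maximal runs of kept characters as slices between banned positions (set membership, a pieces list, one final join) instead of A's per-character filter-and-concatenate pass.
import Mathlib
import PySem

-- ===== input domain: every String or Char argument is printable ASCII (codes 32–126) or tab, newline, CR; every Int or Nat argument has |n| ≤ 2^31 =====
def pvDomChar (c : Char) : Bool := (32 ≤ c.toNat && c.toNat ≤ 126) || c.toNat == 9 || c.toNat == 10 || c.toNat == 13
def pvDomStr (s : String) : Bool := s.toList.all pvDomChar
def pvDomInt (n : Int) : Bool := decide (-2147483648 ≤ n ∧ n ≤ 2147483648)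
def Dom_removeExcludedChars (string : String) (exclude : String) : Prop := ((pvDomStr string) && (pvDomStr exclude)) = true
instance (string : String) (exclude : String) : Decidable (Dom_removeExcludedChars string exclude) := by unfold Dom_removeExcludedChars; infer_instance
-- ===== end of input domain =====

-- B collects the maximal runs of kept characters as slices between banned positions and joins
-- them, instead of A's per-character filter-and-concatenate pass; same return value, alternative algorithm.


-- ===== PORT A =====
-- for char in string: if char in exclude: continue else excludedString += char
def removeExcludedChars (string : String) (exclude : String) : String :=
  string.toList.foldl
    (fun excludedString char =>
      if PySem.Str.isIn (String.ofList [char]) exclude then excludedString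
      else excludedString.push char) ""

-- ===== PORT B =====
-- banned = set(exclude); pieces = []; start = 0
-- for i, ch in enumerate(string): if ch in banned: pieces.append(string[start:i]); start = i+1
-- pieces.append(string[start:]); return "".join(pieces)
def removeExcludedChars_alt (string : String) (exclude : String) : String :=
  let banned : PySem.Set Char := PySem.Set.ofList exclude.toList
  let st := (PySem.List.enumerate string.toList 0).foldl
    (fun (acc : List String × Int) iCh =>
      if PySem.Set.contains banned iCh.2 then
        (acc.1 ++ [String.ofList (PySem.List.slice string.toList (some acc.2) (some iCh.1))],
         iCh.1 + 1)
      else acc)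
    ([], 0)
  PySem.Str.join "" (st.1 ++ [String.ofList (PySem.List.slice string.toList (some st.2) none)])

-- ===== PRECONDITION & SPEC =====
def Spec_removeExcludedChars (string : String) (exclude : String) (out : String) : Prop := out = removeExcludedChars_alt string exclude
instance (string : String) (exclude : String) (out : String) : Decidable (Spec_removeExcludedChars string exclude out) := by unfold Spec_removeExcludedChars; infer_instance

-- ===== CLAIM (what is proved, stated in full; the proofs are below) =====
def Claim_equal_removeExcludedChars : Prop := ∀ (string : String) (exclude : String), Dom_removeExcludedChars string exclude → Spec_removeExcludedChars string exclude (removeExcludedChars string exclude)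

-- ===== LEMMAS AND PROOFS =====

-- A's loop builds the filter of string by chars not occurring in exclude
theorem portA_toList (string exclude : String) :
    (removeExcludedChars string exclude).toList
      = string.toList.filter (fun ch => !(exclude.toList.contains ch)) := by
  unfold removeExcludedChars
  suffices h : ∀ (l : List Char) (acc : String),
      (l.foldl (fun a ch => if PySem.Str.isIn (String.ofList [ch]) exclude then a else a.push ch) acc).toList
        = acc.toList ++ l.filter (fun ch => !(exclude.toList.contains ch)) by
    simpa using h string.toList ""
  intro l
  induction l with
  | nil => simp
  | cons ch t ih =>
    intro acc
    have hmem : PySem.Str.isIn (String.ofList [ch]) exclude = exclude.toList.contains ch := by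
      rw [PySem.Str.isIn_eq]
      simp only [String.toList_ofList]
      by_cases hm : ch ∈ exclude.toList
      · rw [(PySem.Chars.isIn_iff_infix _ _).mpr ((List.singleton_infix_iff ch _).mpr hm)]
        simp [hm]
      · rw [(PySem.Chars.isIn_eq_false_iff _ _).mpr (fun hinf => hm ((List.singleton_infix_iff ch _).mp hinf))]
        simp [hm]
    simp only [List.foldl_cons, hmem]
    by_cases hm : ch ∈ exclude.toList
    · rw [if_pos (by simpa using hm), ih]
      simp [hm]
    · rw [if_neg (by simpa using hm), ih]
      simp [hm]

-- the loop invariant of B's run-collecting pass, by induction on the remaining suffix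
theorem loopB_invariant (l : List Char) (banned : PySem.Set Char) :
    ∀ (suf : List Char) (j start : Nat) (pieces : List String),
      l.drop j = suf → start ≤ j → j ≤ l.length →
      (∀ c ∈ (l.drop start).take (j - start), banned.contains c = false) →
      ((((PySem.List.enumerate suf (j : Int)).foldl
          (fun (acc : List String × Int) iCh =>
            if PySem.Set.contains banned iCh.2 then
              (acc.1 ++ [String.ofList (PySem.List.slice l (some acc.2) (some iCh.1))],
               iCh.1 + 1)
            else acc)
          (pieces, (start : Int))).1.map String.toList).flatten
        ++ (PySem.List.slice l
            (some ((PySem.List.enumerate suf (j : Int)).foldl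
              (fun (acc : List String × Int) iCh =>
                if PySem.Set.contains banned iCh.2 then
                  (acc.1 ++ [String.ofList (PySem.List.slice l (some acc.2) (some iCh.1))],
                   iCh.1 + 1)
                else acc)
              (pieces, (start : Int))).2) none)
        = (pieces.map String.toList).flatten
          ++ (l.drop start).filter (fun c => !(banned.contains c))) := by
  intro suf
  induction suf with
  | nil =>
    intro j start pieces hdrop hsj hjl hkept
    simp only [PySem.List.enumerate_nil, List.foldl_nil]
    rw [PySem.List.slice_from_natCast]
    congr 1
    have hds : l.drop start = (l.drop start).take (j - start) := by
      conv_lhs => rw [← List.take_append_drop (j - start) (l.drop start)]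
      rw [List.drop_drop]
      have h2 : start + (j - start) = j := by omega
      rw [h2, hdrop]
      simp
    rw [hds, List.filter_eq_self.mpr (by intro c hc; simpa using hkept c hc)]
  | cons c rest ih =>
    intro j start pieces hdrop hsj hjl hkept
    have hjlt : j < l.length := by
      by_contra h
      have : l.drop j = [] := List.drop_eq_nil_of_le (by omega)
      rw [hdrop] at this; exact absurd this (by simp)
    have hrest : l.drop (j + 1) = rest := by
      rw [← List.drop_drop, hdrop]; simp
    have hdseq : l.drop start = (l.drop start).take (j - start) ++ c :: l.drop (j + 1) := by
      conv_lhs => rw [← List.take_append_drop (j - start) (l.drop start)]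
      rw [List.drop_drop]
      have h2 : start + (j - start) = j := by omega
      rw [h2, hdrop, hrest]
    rw [PySem.List.enumerate_cons, List.foldl_cons]
    by_cases hc : PySem.Set.contains banned c = true
    · -- banned: close the current run as a slice piece
      rw [if_pos hc]
      have hslice : PySem.List.slice l (some (start : Int)) (some (j : Int))
          = (l.drop start).take (j - start) := PySem.List.slice_natCast l start j
      have hih := ih (j + 1) (j + 1)
        (pieces ++ [String.ofList (PySem.List.slice l (some (start : Int)) (some (j : Int)))])
        hrest (le_refl _) (by omega) (by simp)
      push_cast at hih ⊢
      rw [hih]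
      have hfil : (l.drop start).filter (fun x => !(banned.contains x))
          = (l.drop start).take (j - start)
            ++ (l.drop (j + 1)).filter (fun x => !(banned.contains x)) := by
        conv_lhs => rw [hdseq]
        rw [List.filter_append, List.filter_cons]
        simp only [hc, Bool.not_true]
        rw [if_neg (by simp)]
        rw [List.filter_eq_self.mpr (by intro x hx; simpa using hkept x hx)]
      rw [hfil]
      simp [hslice, List.append_assoc]
    · -- kept: the current run extends by c
      rw [if_neg hc]
      have hkept' : ∀ x ∈ (l.drop start).take (j + 1 - start), banned.contains x = false := by
        intro x hx
        have hn : j + 1 - start = (j - start) + 1 := by omega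
        have hgc : (l.drop start)[j - start]? = some c := by
          rw [List.getElem?_drop]
          have h2 : start + (j - start) = j := by omega
          rw [h2]
          have h3 : l[j]? = (l.drop j)[0]? := by rw [List.getElem?_drop]; simp
          rw [h3, hdrop]
          rfl
        rw [hn, List.take_add_one, hgc] at hx
        rcases List.mem_append.mp hx with h | h
        · exact hkept x h
        · simp at h; subst h; simpa using hc
      have hih := ih (j + 1) start pieces hrest (by omega) (by omega) hkept'
      push_cast at hih ⊢
      exact hih

-- "".join concatenates
theorem join_empty_sep (parts : List (List Char)) :
    PySem.Chars.join [] parts = parts.flatten := by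
  induction parts with
  | nil => simp [PySem.Chars.join_nil]
  | cons p t ih =>
    cases t with
    | nil => simp [PySem.Chars.join_singleton]
    | cons q r =>
      rw [PySem.Chars.join_cons_cons]
      simp [ih]

-- set(exclude) membership agrees with list membership
theorem contains_ofList_eq (xs : List Char) (c : Char) :
    PySem.Set.contains (PySem.Set.ofList xs) c = xs.contains c := by
  simp [PySem.Set.contains_eq_listContains, PySem.Set.mem_ofList]

-- B computes the same filter
theorem portB_toList (string exclude : String) :
    (removeExcludedChars_alt string exclude).toList
      = string.toList.filter (fun ch => !(exclude.toList.contains ch)) := by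
  unfold removeExcludedChars_alt
  rw [PySem.Str.toList_join, show ("" : String).toList = [] from rfl, join_empty_sep]
  simp only [List.map_append, List.map_cons, List.map_nil, List.flatten_append,
    List.flatten_cons, List.flatten_nil, List.append_nil, String.toList_ofList]
  have hinv := loopB_invariant string.toList (PySem.Set.ofList exclude.toList)
    string.toList 0 0 [] (by simp) (Nat.le_refl _) (Nat.zero_le _) (by simp)
  simp only [Nat.cast_zero, List.drop_zero, List.map_nil, List.flatten_nil,
    List.nil_append] at hinv
  rw [hinv]
  apply List.filter_congr
  intro x _
  rw [contains_ofList_eq]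

-- ===== VERDICT (by name: the statement is the Claim_ definition above) =====
theorem removeExcludedChars_spec : Claim_equal_removeExcludedChars := by
  intro string exclude _
  unfold Spec_removeExcludedChars
  apply String.toList_inj.mp
  rw [portA_toList, portB_toList]
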